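-- pv_equiv track=rewrite | github.com/tlucanti/contest | Codeforces/div845/A.py | solve
-- ===== SOURCE A (Python) =====
-- def solve(a):
--     r = a[0] % 2
--     ans = 0
--     for i in range(1, len(a)):
--         if a[i] % 2 != r:
--             r = 1 - r
--         else:
--             ans += 1
--     return ans
-- ===== SOURCE B (Python) =====
-- def solve(a):
--     s = ''.join(str(x % 2) for x in a)
--     return len(a) - 1 - s.count('01') - s.count('10')
-- ===== Notes on version B (the rewrite author's own statement) =====
-- stated objective: alternative
-- what changed: Replaced the stateful toggle loop by a different representation: B renders the parity sequence as a '0'/'1' string and computes the answer arithmetically as len(a)-1 minus the number of parity changes, obtained by substring counting s.count('01')+s.count('10'); no per-element branch or carried state.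
import Mathlib
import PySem

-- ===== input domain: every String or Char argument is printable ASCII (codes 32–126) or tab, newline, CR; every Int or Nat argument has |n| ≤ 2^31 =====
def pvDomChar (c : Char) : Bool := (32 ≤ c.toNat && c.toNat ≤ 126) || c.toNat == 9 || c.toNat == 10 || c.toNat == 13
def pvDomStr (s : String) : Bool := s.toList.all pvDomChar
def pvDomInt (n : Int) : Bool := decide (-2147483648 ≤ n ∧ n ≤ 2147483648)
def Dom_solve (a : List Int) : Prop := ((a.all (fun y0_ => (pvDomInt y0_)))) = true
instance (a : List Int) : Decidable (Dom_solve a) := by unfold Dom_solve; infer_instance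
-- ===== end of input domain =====

-- B replaces A's stateful toggle loop by a parity string plus substring counting: the answer is
-- len(a)-1 minus the number of parity changes, counted as s.count('01')+s.count('10') (alternative, same O(n)).

-- ===== PORT A =====
-- r = a[0] % 2; ans = 0; for i in range(1, len(a)): if a[i]%2 != r: r = 1-r else: ans += 1
-- indexing the first element raises IndexError on the empty list: excluded by Pre_solve; inside Pre_ all
-- indices i of the range are in bounds, so pyGetD with default 0 is exact.
def solve (a : List Int) : Int :=
  ((PySem.List.pyRange 1 (a.length : Int) 1).foldl
    (fun (st : Int × Int) i =>
      if PySem.Int.mod (PySem.List.pyGetD a i 0) 2 ≠ st.1 then (1 - st.1, st.2)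
      else (st.1, st.2 + 1))
    (PySem.Int.mod (PySem.List.pyGetD a 0 0) 2, 0)).2

-- ===== PORT B =====
-- s = ''.join(str(x % 2) for x in a); return len(a) - 1 - s.count('01') - s.count('10')
def solve_alt (a : List Int) : Int :=
  let s := PySem.Str.join "" (a.map (fun x => PySem.Int.toStr (PySem.Int.mod x 2)))
  (a.length : Int) - 1 - (PySem.Str.count s "01" : Int) - (PySem.Str.count s "10" : Int)

-- ===== PRECONDITION & SPEC =====
-- Pre_ excludes only the empty list, on which A raises IndexError reading the first element.
def Pre_solve (a : List Int) : Prop := a ≠ []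
instance (a : List Int) : Decidable (Pre_solve a) := by unfold Pre_solve; infer_instance
def pvWitness_solve : List Int := ([2, 3, 5])

def Spec_solve (a : List Int) (out : Int) : Prop := out = solve_alt a
instance (a : List Int) (out : Int) : Decidable (Spec_solve a out) := by unfold Spec_solve; infer_instance

-- ===== CLAIM (what is proved, stated in full; the proofs are below) =====
def Claim_equal_solve : Prop := ∀ (a : List Int), Dom_solve a → Pre_solve a → Spec_solve a (solve a)

-- ===== LEMMAS AND PROOFS =====

-- parity character of an int, as B's string builds it
def pvPC (x : Int) : Char := if PySem.Int.mod x 2 = 0 then '0' else '1'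

-- number of adjacent equal-parity pairs, carrying previous parity p (characterises A's loop)
def pvCnt : Int → List Int → Int
  | _, [] => 0
  | p, x :: xs => (if PySem.Int.mod x 2 = p then 1 else 0) + pvCnt (PySem.Int.mod x 2) xs

-- occurrences of "01" starting at each position
def pvUp : List Char → Nat
  | c1 :: c2 :: t => (if c1 = '0' ∧ c2 = '1' then 1 else 0) + pvUp (c2 :: t)
  | _ => 0

-- occurrences of "10" starting at each position
def pvDn : List Char → Nat
  | c1 :: c2 :: t => (if c1 = '1' ∧ c2 = '0' then 1 else 0) + pvDn (c2 :: t)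
  | _ => 0

lemma pv_mod2_cases (x : Int) : PySem.Int.mod x 2 = 0 ∨ PySem.Int.mod x 2 = 1 := by
  have h1 := PySem.Int.mod_nonneg x (b := 2) (by norm_num)
  have h2 := PySem.Int.mod_lt x (b := 2) (by norm_num)
  omega

lemma pvUp_one_cons (t : List Char) : pvUp ('1' :: t) = pvUp t := by
  cases t with
  | nil => rfl
  | cons c2 t2 => simp [pvUp]

lemma pvDn_zero_cons (t : List Char) : pvDn ('0' :: t) = pvDn t := by
  cases t with
  | nil => rfl
  | cons c2 t2 => simp [pvDn]

-- base and step unfoldings of the fuel-driven substring scanner of PySem.Chars.count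
lemma pv_go_nil (sub : List Char) (fuel acc : Nat) :
    PySem.Chars.count.go sub fuel [] acc = acc := by cases fuel <;> rfl

lemma pv_go_succ (sub : List Char) (f : Nat) (c : Char) (t : List Char) (acc : Nat) :
    PySem.Chars.count.go sub (f+1) (c::t) acc =
      if sub.isPrefixOf (c::t) then PySem.Chars.count.go sub f (List.drop sub.length (c::t)) (acc+1)
      else PySem.Chars.count.go sub f t acc := by
  rw [PySem.Chars.count.go]

-- the scanner characterised for the pattern "01" on binary strings
lemma pv_go_up (fuel : Nat) : ∀ (l : List Char) (acc : Nat), l.length ≤ fuel →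
    (∀ c ∈ l, c = '0' ∨ c = '1') →
    PySem.Chars.count.go "01".toList fuel l acc = acc + pvUp l := by
  induction fuel with
  | zero =>
    intro l acc hlen _
    have : l = [] := List.length_eq_zero_iff.mp (Nat.le_zero.mp hlen)
    subst this; rfl
  | succ f ih =>
    intro l acc hlen hbin
    cases l with
    | nil => exact pv_go_nil _ _ _
    | cons c t =>
      cases t with
      | nil =>
        rcases hbin c (by simp) with rfl | rfl <;>
          simp [pv_go_succ, List.isPrefixOf, pv_go_nil, pvUp]
      | cons c2 t2 =>
        have hlen2 : t2.length ≤ f := by simp at hlen; omega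
        have hlent : (c2 :: t2).length ≤ f := by simp at hlen ⊢; omega
        have hbt : ∀ x ∈ c2 :: t2, x = '0' ∨ x = '1' := fun x hx => hbin x (by simp [hx])
        have hbt2 : ∀ x ∈ t2, x = '0' ∨ x = '1' := fun x hx => hbin x (by simp [hx])
        rw [pv_go_succ]
        rcases hbin c (by simp) with rfl | rfl <;> rcases hbin c2 (by simp) with rfl | rfl
        · rw [if_neg (by simp [List.isPrefixOf]), ih _ acc hlent hbt]
          simp [pvUp]
        · rw [if_pos (by simp [List.isPrefixOf]),
              show List.drop ("01".toList.length) ('0' :: '1' :: t2) = t2 from rfl,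
              ih t2 (acc + 1) hlen2 hbt2]
          simp [pvUp, pvUp_one_cons]
          omega
        · rw [if_neg (by simp [List.isPrefixOf]), ih _ acc hlent hbt]
          simp [pvUp]
        · rw [if_neg (by simp [List.isPrefixOf]), ih _ acc hlent hbt]
          simp [pvUp]

-- the scanner characterised for the pattern "10" on binary strings
lemma pv_go_dn (fuel : Nat) : ∀ (l : List Char) (acc : Nat), l.length ≤ fuel →
    (∀ c ∈ l, c = '0' ∨ c = '1') →
    PySem.Chars.count.go "10".toList fuel l acc = acc + pvDn l := by
  induction fuel with
  | zero =>
    intro l acc hlen _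
    have : l = [] := List.length_eq_zero_iff.mp (Nat.le_zero.mp hlen)
    subst this; rfl
  | succ f ih =>
    intro l acc hlen hbin
    cases l with
    | nil => exact pv_go_nil _ _ _
    | cons c t =>
      cases t with
      | nil =>
        rcases hbin c (by simp) with rfl | rfl <;>
          simp [pv_go_succ, List.isPrefixOf, pv_go_nil, pvDn]
      | cons c2 t2 =>
        have hlen2 : t2.length ≤ f := by simp at hlen; omega
        have hlent : (c2 :: t2).length ≤ f := by simp at hlen ⊢; omega
        have hbt : ∀ x ∈ c2 :: t2, x = '0' ∨ x = '1' := fun x hx => hbin x (by simp [hx])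
        have hbt2 : ∀ x ∈ t2, x = '0' ∨ x = '1' := fun x hx => hbin x (by simp [hx])
        rw [pv_go_succ]
        rcases hbin c (by simp) with rfl | rfl <;> rcases hbin c2 (by simp) with rfl | rfl
        · rw [if_neg (by simp [List.isPrefixOf]), ih _ acc hlent hbt]
          simp [pvDn]
        · rw [if_neg (by simp [List.isPrefixOf]), ih _ acc hlent hbt]
          simp [pvDn]
        · rw [if_pos (by simp [List.isPrefixOf]),
              show List.drop ("10".toList.length) ('1' :: '0' :: t2) = t2 from rfl,
              ih t2 (acc + 1) hlen2 hbt2]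
          simp [pvDn, pvDn_zero_cons]
          omega
        · rw [if_neg (by simp [List.isPrefixOf]), ih _ acc hlent hbt]
          simp [pvDn]

-- A's loop: starting state p = parity of prev, result adds the equal-adjacent count
lemma pv_foldA (xs : List Int) (p ans : Int) (hp : p = 0 ∨ p = 1) :
    (xs.foldl (fun (st : Int × Int) x =>
        if PySem.Int.mod x 2 ≠ st.1 then (1 - st.1, st.2)
        else (st.1, st.2 + 1)) (p, ans)).2 = ans + pvCnt p xs := by
  induction xs generalizing p ans with
  | nil => simp [pvCnt]
  | cons x xs ih =>
    have hx := pv_mod2_cases x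
    simp only [List.foldl_cons]
    by_cases h : PySem.Int.mod x 2 = p
    · rw [if_neg (fun hc => hc h), ih p (ans + 1) hp]
      simp only [pvCnt, h, if_true]
      ring
    · have h1 : (1 : Int) - p = PySem.Int.mod x 2 := by omega
      rw [if_pos h, h1, ih _ ans hx]
      simp only [pvCnt, if_neg h]
      ring

lemma pvPC_eq_zero (x : Int) (h : PySem.Int.mod x 2 = 0) : pvPC x = '0' := by
  unfold pvPC; rw [h]; simp

lemma pvPC_eq_one (x : Int) (h : PySem.Int.mod x 2 = 1) : pvPC x = '1' := by
  unfold pvPC; rw [h]; norm_num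

-- equal pairs + parity changes = number of adjacent pairs
lemma pv_cnt_trans (xs : List Int) : ∀ (prev : Int),
    pvCnt (PySem.Int.mod prev 2) xs
      + ((pvUp ((prev :: xs).map pvPC) : Int) + (pvDn ((prev :: xs).map pvPC) : Int))
      = (xs.length : Int) := by
  induction xs with
  | nil => intro prev; simp [pvCnt, pvUp, pvDn]
  | cons x xs ih =>
    intro prev
    have hm := ih x
    simp only [List.map_cons] at hm ⊢
    simp only [pvCnt, pvUp, pvDn, List.length_cons]
    rcases pv_mod2_cases prev with h0 | h0 <;> rcases pv_mod2_cases x with g0 | g0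
    · rw [pvPC_eq_zero prev h0, pvPC_eq_zero x g0] ;
        rw [pvPC_eq_zero x g0] at hm ;
        rw [g0] at hm ;
        rw [h0, g0] ; norm_num ; omega
    · rw [pvPC_eq_zero prev h0, pvPC_eq_one x g0] ;
        rw [pvPC_eq_one x g0] at hm ;
        rw [g0] at hm ;
        rw [h0, g0] ; norm_num ; omega
    · rw [pvPC_eq_one prev h0, pvPC_eq_zero x g0] ;
        rw [pvPC_eq_zero x g0] at hm ;
        rw [g0] at hm ;
        rw [h0, g0] ; norm_num ; omega
    · rw [pvPC_eq_one prev h0, pvPC_eq_one x g0] ;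
        rw [pvPC_eq_one x g0] at hm ;
        rw [g0] at hm ;
        rw [h0, g0] ; norm_num ; omega

-- B's parity string is the elementwise parity-character list
lemma pv_join_chars (a : List Int) :
    (PySem.Str.join "" (a.map (fun x => PySem.Int.toStr (PySem.Int.mod x 2)))).toList
      = a.map pvPC := by
  have hstep : ∀ x : Int, (PySem.Int.toStr (PySem.Int.mod x 2)).toList = [pvPC x] := by
    intro x; unfold pvPC; rcases pv_mod2_cases x with h | h <;> rw [h] <;> rfl
  have h1 : List.map String.toList (a.map (fun x => PySem.Int.toStr (PySem.Int.mod x 2)))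
      = List.map (fun c => [c]) (a.map pvPC) := by
    rw [List.map_map, List.map_map]
    exact List.map_congr_left (fun x _ => hstep x)
  simp only [PySem.Str.join, String.toList_ofList]
  rw [show ("" : String).toList = ([] : List Char) from rfl, h1]
  exact PySem.Chars.join_nil_singletons (a.map pvPC)

-- ===== VERDICT (by name: the statement is the Claim_ definition above) =====
theorem solve_spec : Claim_equal_solve := by
  intro a _ hpre
  obtain ⟨a0, rest, rfl⟩ : ∃ a0 rest, a = a0 :: rest := by
    cases a with
    | nil => exact absurd rfl hpre
    | cons a0 rest => exact ⟨a0, rest, rfl⟩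
  unfold Spec_solve solve solve_alt
  -- A side
  rw [PySem.List.foldl_pyRange_pyGetD' (a0 :: rest) 0
    (fun (st : Int × Int) x =>
      if PySem.Int.mod x 2 ≠ st.1 then (1 - st.1, st.2)
      else (st.1, st.2 + 1)) _ (a := 1) (by norm_num)]
  simp only [Int.toNat_one, List.drop_succ_cons, List.drop_zero]
  rw [pv_foldA rest (PySem.Int.mod (PySem.List.pyGetD (a0 :: rest) 0 0) 2) 0
        (by simpa [PySem.List.pyGetD] using pv_mod2_cases a0)]
  -- B side
  have hs := pv_join_chars (a0 :: rest)
  have hbin : ∀ c ∈ ((a0 :: rest).map pvPC), c = '0' ∨ c = '1' := by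
    intro c hc
    obtain ⟨x, _, rfl⟩ := List.mem_map.mp hc
    unfold pvPC; split_ifs <;> simp
  have hne : ¬ ("01".toList.isEmpty = true) := by decide
  have hne2 : ¬ ("10".toList.isEmpty = true) := by decide
  simp only [PySem.Str.count_eq, hs]
  unfold PySem.Chars.count
  rw [if_neg hne, if_neg hne2]
  rw [pv_go_up _ _ 0 (le_refl _) hbin, pv_go_dn _ _ 0 (le_refl _) hbin]
  have hget : PySem.List.pyGetD (a0 :: rest) 0 0 = a0 := by
    simp [PySem.List.pyGetD, PySem.List.pyGet?, PySem.List.pyIdx?]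
  rw [hget]
  have hkey := pv_cnt_trans rest a0
  simp only [List.length_cons]
  omega
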